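-- pv_equiv track=rewrite | github.com/aLittlecrocodile/RapidRAR | src/utils.py | generate_password_batch
-- ===== SOURCE A (Python) =====
-- def generate_password_batch(charset, length, start_idx, batch_size):
--     """
--     生成一批特定长度的密码
--
--     Args:
--         charset: 字符集
--         length: 密码长度
--         start_idx: 起始索引
--         batch_size: 批量大小
--
--     Returns:
--         生成的密码列表
--     """
--     charset_len = len(charset)
--     passwords = []
--
--     for i in range(start_idx, min(start_idx + batch_size, charset_len ** length)):
--         # 将索引转换为基于字符集的数字系统
--         password = []
--         idx = i
--         for _ in range(length):
--             password.append(charset[idx % charset_len])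
--             idx //= charset_len
--         passwords.append(''.join(reversed(password)))
--
--     return passwords
-- ===== SOURCE B (Python) =====
-- def _incr(digits, n):
--     """Odometer increment of a least-significant-first base-n digit list (carry off the top drops)."""
--     out = list(digits)
--     j = 0
--     while j < len(out):
--         if out[j] + 1 < n:
--             out[j] += 1
--             return out
--         out[j] = 0
--         j += 1
--     return out
--
--
-- def generate_password_batch(charset, length, start_idx, batch_size):
--     n = len(charset)
--     end = min(start_idx + batch_size, n ** length)
--     count = end - start_idx
--     if count <= 0:
--         return []
--     # digit list (least significant first) of the starting index
--     digits = []
--     idx = start_idx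
--     for _ in range(length):
--         idx, d = divmod(idx, n)
--         digits.append(d)
--     out = []
--     for _ in range(count):
--         out.append(''.join(charset[d] for d in reversed(digits)))
--         digits = _incr(digits, n)
--     return out
-- ===== Notes on version B (the rewrite author's own statement) =====
-- stated objective: alternative
-- what changed: B computes the base-N digit array of start_idx once and then advances it as an odometer (carry-propagating increment) across the batch, instead of A's independent div/mod decomposition of every index.
import Mathlib
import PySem

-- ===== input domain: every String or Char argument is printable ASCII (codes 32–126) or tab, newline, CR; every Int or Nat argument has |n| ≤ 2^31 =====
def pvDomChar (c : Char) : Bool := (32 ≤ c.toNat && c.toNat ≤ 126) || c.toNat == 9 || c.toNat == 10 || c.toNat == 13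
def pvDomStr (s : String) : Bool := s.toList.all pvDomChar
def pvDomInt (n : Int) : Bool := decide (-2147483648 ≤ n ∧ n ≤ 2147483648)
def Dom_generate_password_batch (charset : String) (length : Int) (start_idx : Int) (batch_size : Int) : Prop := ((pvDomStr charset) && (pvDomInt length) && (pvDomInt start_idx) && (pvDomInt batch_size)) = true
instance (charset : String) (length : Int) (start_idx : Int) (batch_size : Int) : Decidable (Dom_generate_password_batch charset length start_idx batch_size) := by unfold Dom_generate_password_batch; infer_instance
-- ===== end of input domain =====

-- B replaces A's independent div/mod decomposition of every index by a single base-N digit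
-- array advanced as an odometer (carry-propagating increment) across the batch: an
-- alternative algorithm of the same asymptotic cost.

-- ===== PORT A =====
def generate_password_batch (charset : String) (length : Int) (start_idx : Int) (batch_size : Int) : List String :=
  let cs := charset.toList
  let n : Int := (cs.length : Int)
  let stop := min (start_idx + batch_size) (n ^ length.toNat)
  (PySem.List.pyRange start_idx stop 1).foldl (fun passwords i =>
    let pw := ((List.range length.toNat).foldl
      (fun (p : List Char × Int) _ =>
        -- charset[idx % charset_len]: the index is in range whenever Python does not raise,
        -- so the getD default is never used on admitted inputs
        (p.1 ++ [cs.getD (PySem.Int.mod p.2 n).toNat ' '], PySem.Int.floordiv p.2 n))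
      ([], i)).1
    passwords ++ [String.mk pw.reverse]) []

-- ===== PORT B =====
-- odometer increment of a least-significant-first base-n digit list (carry off the top drops)
def pvIncr (n : Int) : List Int → List Int
  | [] => []
  | d :: ds => if d + 1 < n then (d + 1) :: ds else 0 :: pvIncr n ds

def generate_password_batch_alt (charset : String) (length : Int) (start_idx : Int) (batch_size : Int) : List String :=
  let cs := charset.toList
  let n : Int := (cs.length : Int)
  let stop := min (start_idx + batch_size) (n ^ length.toNat)
  let count := stop - start_idx
  if count ≤ 0 then []
  else
    let digits := ((List.range length.toNat).foldl
      (fun (p : List Int × Int) _ => (p.1 ++ [PySem.Int.mod p.2 n], PySem.Int.floordiv p.2 n))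
      ([], start_idx)).1
    ((List.range count.toNat).foldl
      (fun (p : List String × List Int) _ =>
        (p.1 ++ [String.mk (p.2.reverse.map (fun d => cs.getD d.toNat ' '))], pvIncr n p.2))
      ([], digits)).1

-- ===== PRECONDITION & SPEC =====
-- Pre_ admits exactly the inputs on which Python A returns: it excludes only raising inputs —
-- an empty charset with positive length and a nonempty negative index range (ZeroDivisionError),
-- and negative lengths except where Python's int/float min still yields an int range bound
-- (otherwise TypeError, or ZeroDivisionError for an empty charset).
def Pre_generate_password_batch (charset : String) (length : Int) (start_idx : Int) (batch_size : Int) : Prop :=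
  (0 ≤ length ∧ ¬(charset.toList.length = 0 ∧ 0 < length ∧ 0 < batch_size ∧ start_idx < 0))
  ∨ (length < 0 ∧ ((charset.toList.length = 1 ∧ start_idx + batch_size ≤ 1)
                   ∨ (2 ≤ charset.toList.length ∧ start_idx + batch_size ≤ 0)))
instance (charset : String) (length : Int) (start_idx : Int) (batch_size : Int) : Decidable (Pre_generate_password_batch charset length start_idx batch_size) := by unfold Pre_generate_password_batch; infer_instance

def pvWitness_generate_password_batch : String × Int × Int × Int := ("ab", 2, 1, 3)

def Spec_generate_password_batch (charset : String) (length : Int) (start_idx : Int) (batch_size : Int) (out : List String) : Prop := out = generate_password_batch_alt charset length start_idx batch_size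
instance (charset : String) (length : Int) (start_idx : Int) (batch_size : Int) (out : List String) : Decidable (Spec_generate_password_batch charset length start_idx batch_size out) := by unfold Spec_generate_password_batch; infer_instance

-- ===== CLAIM (what is proved, stated in full; the proofs are below) =====
def Claim_equal_generate_password_batch : Prop := ∀ (charset : String) (length : Int) (start_idx : Int) (batch_size : Int), Dom_generate_password_batch charset length start_idx batch_size → Pre_generate_password_batch charset length start_idx batch_size → Spec_generate_password_batch charset length start_idx batch_size (generate_password_batch charset length start_idx batch_size)

-- ===== LEMMAS AND PROOFS =====

-- least-significant-first base-n digit list of i, as A's inner loop produces it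
def pvDigits (n : Int) : Nat → Int → List Int
  | 0, _ => []
  | L+1, i => PySem.Int.mod i n :: pvDigits n (L) (PySem.Int.floordiv i n)

-- the quotient left after L division steps
def pvQ (n : Int) : Nat → Int → Int
  | 0, i => i
  | L+1, i => pvQ n (L) (PySem.Int.floordiv i n)

theorem pv_foldl_const {α β : Type} (g : β → β) (l : List α) (s : β) :
    l.foldl (fun s _ => g s) s = g^[l.length] s := by
  induction l generalizing s with
  | nil => rfl
  | cons a t ih => simpa [Function.iterate_succ_apply] using ih (g s)

theorem pv_foldl_append_map {α β : Type} (f : α → β) (l : List α) (acc : List β) :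
    l.foldl (fun acc x => acc ++ [f x]) acc = acc ++ l.map f := by
  induction l generalizing acc with
  | nil => simp
  | cons a t ih => simp [ih]

theorem pv_digits_build (cs : List Char) (n : Int) (L : Nat) :
    ∀ (i : Int) (acc : List Int),
      (fun (p : List Int × Int) => (p.1 ++ [PySem.Int.mod p.2 n], PySem.Int.floordiv p.2 n))^[L] (acc, i)
        = (acc ++ pvDigits n L i, pvQ n L i) := by
  induction L with
  | zero => intro i acc; simp [pvDigits, pvQ]
  | succ L ih =>
      intro i acc
      rw [Function.iterate_succ_apply]
      dsimp only
      rw [ih]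
      simp [pvDigits, pvQ]

theorem pv_chars_build (cs : List Char) (n : Int) (L : Nat) :
    ∀ (i : Int) (acc : List Char),
      (fun (p : List Char × Int) => (p.1 ++ [cs.getD (PySem.Int.mod p.2 n).toNat ' '], PySem.Int.floordiv p.2 n))^[L] (acc, i)
        = (acc ++ (pvDigits n L i).map (fun d => cs.getD d.toNat ' '), pvQ n L i) := by
  induction L with
  | zero => intro i acc; simp [pvDigits, pvQ]
  | succ L ih =>
      intro i acc
      rw [Function.iterate_succ_apply]
      dsimp only
      rw [ih]
      simp [pvDigits, pvQ]

theorem pv_incr_digits (n : Int) (hn : 0 < n) (L : Nat) :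
    ∀ i : Int, pvIncr n (pvDigits n L i) = pvDigits n L (i + 1) := by
  induction L with
  | zero => intro i; simp [pvDigits, pvIncr]
  | succ L ih =>
      intro i
      have hne : n ≠ 0 := ne_of_gt hn
      have h1 : n * (i / n) + i % n = i := Int.ediv_add_emod i n
      have hr0 : 0 ≤ i % n := Int.emod_nonneg i hne
      have hrn : i % n < n := Int.emod_lt_of_pos i hn
      simp only [pvDigits, PySem.Int.mod_eq_emod_of_pos hn, PySem.Int.floordiv_eq_ediv_of_pos hn,
        pvIncr]
      by_cases hlt : i % n + 1 < n
      · have hi : i + 1 = (i % n + 1) + n * (i / n) := by omega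
        have e1 : (i + 1) % n = i % n + 1 := by
          rw [hi, Int.add_mul_emod_self_left, Int.emod_eq_of_lt (by omega) hlt]
        have e2 : (i + 1) / n = i / n := by
          rw [hi, Int.add_mul_ediv_left _ _ hne, Int.ediv_eq_zero_of_lt (by omega) hlt, zero_add]
        rw [if_pos hlt, e1, e2]
      · have hr : i % n + 1 = n := by omega
        have hi : i + 1 = 0 + n * (i / n + 1) := by
          rw [mul_add, mul_one]; omega
        have e1 : (i + 1) % n = 0 := by
          rw [hi, Int.add_mul_emod_self_left, Int.zero_emod]
        have e2 : (i + 1) / n = i / n + 1 := by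
          rw [hi, Int.add_mul_ediv_left _ _ hne, Int.zero_ediv, zero_add]
        rw [if_neg hlt, e1, e2, ih]

theorem pv_incr_digits' (n : Int) (L : Nat) (h : 0 < n ∨ L = 0) (i : Int) :
    pvIncr n (pvDigits n L i) = pvDigits n L (i + 1) := by
  rcases h with hn | hL
  · exact pv_incr_digits n hn L i
  · subst hL; simp [pvDigits, pvIncr]

theorem pvB_outer (cs : List Char) (n : Int) (L : Nat) (h : 0 < n ∨ L = 0) :
    ∀ (c : Nat) (i : Int) (acc : List String),
      (fun (p : List String × List Int) =>
          (p.1 ++ [String.mk (p.2.reverse.map (fun d => cs.getD d.toNat ' '))], pvIncr n p.2))^[c] (acc, pvDigits n L i)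
        = (acc ++ (List.range c).map
              (fun (k : Nat) => String.mk ((pvDigits n L (i + (k : Int))).reverse.map (fun d => cs.getD d.toNat ' '))),
           pvDigits n L (i + (c : Int))) := by
  intro c
  induction c with
  | zero => intro i acc; simp
  | succ c ih =>
      intro i acc
      rw [Function.iterate_succ_apply', ih]
      dsimp only
      rw [pv_incr_digits' n L h]
      refine Prod.ext ?_ ?_
      · simp [List.range_succ, List.append_assoc]
      · dsimp only
        congr 1
        push_cast
        ring

theorem generate_password_batch_spec : Claim_equal_generate_password_batch := by
  unfold Claim_equal_generate_password_batch Spec_generate_password_batch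
  intro charset length s bs _hDom hPre
  simp only [generate_password_batch, generate_password_batch_alt]
  by_cases hc : min (s + bs) ((charset.toList.length : Int) ^ length.toNat) - s ≤ 0
  · rw [if_pos hc, PySem.List.pyRange_one_eq_nil (by omega)]
    rfl
  · rw [if_neg hc]
    have h : 0 < (charset.toList.length : Int) ∨ length.toNat = 0 := by
      by_cases hL : length.toNat = 0
      · exact Or.inr hL
      · left
        by_contra hn
        have hn0 : charset.toList.length = 0 := by omega
        have hpow : ((charset.toList.length : Int)) ^ length.toNat = 0 := by
          rw [hn0]; simp [zero_pow hL]
        have hlen : 0 < length := by omega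
        rcases hPre with ⟨_, hnot⟩ | ⟨hneg, _⟩
        · push_neg at hnot
          have := hnot hn0 hlen
          omega
        · omega
    -- reduce both ports to maps over index ranges
    simp only [pv_foldl_append_map, pv_foldl_const, List.length_range, pv_chars_build charset.toList,
      pv_digits_build charset.toList, List.nil_append]
    rw [pvB_outer charset.toList ((charset.toList.length : Int)) length.toNat h
      ((min (s + bs) ((charset.toList.length : Int) ^ length.toNat) - s)).toNat s []]
    simp only [List.nil_append, PySem.List.pyRange_one, List.map_map]
    simp only [List.map_reverse]
    exact List.map_congr_left fun k _ => rfl
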